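-- pv_equiv track=rewrite | github.com/Michaelkomolafe1/All_in_one_optimizer | step3_stack_detection.py | _has_consecutive_orders
-- ===== SOURCE A (Python) =====
-- from typing import Dict, List, Set, Tuple, Optional
--
-- def _has_consecutive_orders(orders: List[int]) -> bool:
--     """Check if batting orders are consecutive"""
--     if len(orders) < 2:
--         return False
--
--     sorted_orders = sorted(orders)
--     for i in range(len(sorted_orders) - 1):
--         if sorted_orders[i + 1] - sorted_orders[i] == 1:
--             return True
--     return False
-- ===== SOURCE B (Python) =====
-- def _has_consecutive_orders(orders):
--     """Check if batting orders are consecutive: hash-set membership instead of sorting."""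
--     present = set(orders)
--     return any(x + 1 in present for x in orders)
-- ===== Notes on version B (the rewrite author's own statement) =====
-- stated objective: simpler
-- what changed: Replaced sort-then-adjacent-scan with a hash-set lookup: build set(orders) once and test whether x+1 is present for any x, removing the sort and the index loop entirely.
import Mathlib
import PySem

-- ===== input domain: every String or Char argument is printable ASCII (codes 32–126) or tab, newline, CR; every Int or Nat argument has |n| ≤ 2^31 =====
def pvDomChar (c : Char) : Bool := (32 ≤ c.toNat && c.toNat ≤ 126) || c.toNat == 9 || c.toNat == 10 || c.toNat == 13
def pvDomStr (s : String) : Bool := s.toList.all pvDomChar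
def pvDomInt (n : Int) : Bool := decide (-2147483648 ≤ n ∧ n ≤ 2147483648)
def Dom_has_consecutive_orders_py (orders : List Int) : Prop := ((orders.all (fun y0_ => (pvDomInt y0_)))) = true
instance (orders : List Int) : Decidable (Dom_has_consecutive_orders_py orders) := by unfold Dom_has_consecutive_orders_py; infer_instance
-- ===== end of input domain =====

-- B replaces A's sort-then-adjacent-scan with a set-membership check: build set(orders), test x+1 in it for each x.

-- ===== PORT A =====
-- A: early return for len < 2, then sort, then index-loop over range(len-1)
-- checking sorted[i+1] - sorted[i] == 1 with early return True.
-- Indices i and i+1 are always in range, so pyGetD's default 0 is never used.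
def has_consecutive_orders_py (orders : List Int) : Bool :=
  if orders.length < 2 then false
  else
    let sorted_orders := PySem.List.sorted orders (fun x => x) false
    (PySem.List.pyRange 0 ((sorted_orders.length : Int) - 1) 1).any (fun i =>
      PySem.List.pyGetD sorted_orders (i + 1) 0 - PySem.List.pyGetD sorted_orders i 0 == 1)

-- ===== PORT B =====
-- B: present = set(orders); any(x + 1 in present for x in orders)
def has_consecutive_orders_py_alt (orders : List Int) : Bool :=
  let present := PySem.Set.ofList orders
  orders.any (fun x => present.contains (x + 1))

-- ===== PRECONDITION & SPEC =====
def Spec_has_consecutive_orders_py (orders : List Int) (out : Bool) : Prop := out = has_consecutive_orders_py_alt orders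
instance (orders : List Int) (out : Bool) : Decidable (Spec_has_consecutive_orders_py orders out) := by unfold Spec_has_consecutive_orders_py; infer_instance

-- ===== CLAIM (what is proved, stated in full; the proofs are below) =====
def Claim_equal_has_consecutive_orders_py : Prop := ∀ (orders : List Int), Dom_has_consecutive_orders_py orders → Spec_has_consecutive_orders_py orders (has_consecutive_orders_py orders)

-- ===== LEMMAS AND PROOFS =====

-- Both programs decide the same proposition: some x with x and x+1 both in the list.
def ConsecPair (l : List Int) : Prop := ∃ x ∈ l, x + 1 ∈ l

-- B-side characterisation
theorem alt_iff (l : List Int) : has_consecutive_orders_py_alt l = true ↔ ConsecPair l := by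
  simp [has_consecutive_orders_py_alt, ConsecPair, List.any_eq_true, PySem.Set.mem_ofList]

-- adjacent-difference-1 scan, the shape A's index loop takes over the sorted list
def adjOne : List Int → Bool
  | a :: b :: t => (b - a == 1) || adjOne (b :: t)
  | _ => false

theorem adjOne_iff_getD (s : List Int) :
    adjOne s = true ↔ ∃ k : ℕ, k + 1 < s.length ∧ s.getD (k + 1) 0 - s.getD k 0 = 1 := by
  induction s with
  | nil => simp [adjOne]
  | cons a t ih =>
    cases t with
    | nil => simp [adjOne]
    | cons b u =>
      simp only [adjOne, Bool.or_eq_true, beq_iff_eq, ih]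
      constructor
      · rintro (h | ⟨k, hk, hd⟩)
        · exact ⟨0, by simp, by simpa using h⟩
        · exact ⟨k + 1, by simpa using hk, by simpa using hd⟩
      · rintro ⟨k, hk, hd⟩
        cases k with
        | zero => exact Or.inl (by simpa using hd)
        | succ k => exact Or.inr ⟨k, by simpa using hk, by simpa using hd⟩

-- on a ≤-sorted list, an adjacent gap of 1 is the same as having some x and x+1 present
theorem adjOne_iff_pair (s : List Int) (h : s.Pairwise (fun a b => a ≤ b)) :
    adjOne s = true ↔ ConsecPair s := by
  induction s with
  | nil => simp [adjOne, ConsecPair]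
  | cons a t ih =>
    cases t with
    | nil => simp [adjOne, ConsecPair]
    | cons b u =>
      rcases List.pairwise_cons.mp h with ⟨hab, ht⟩
      have hab' : a ≤ b := hab b (.head _)
      have hble : ∀ y ∈ u, b ≤ y := (List.pairwise_cons.mp ht).1
      simp only [adjOne, Bool.or_eq_true, beq_iff_eq, ih ht, ConsecPair]
      constructor
      · rintro (h1 | ⟨x, hx, hx1⟩)
        · exact ⟨a, .head _, by rw [show a + 1 = b by omega]; exact .tail _ (.head _)⟩
        · exact ⟨x, .tail _ hx, .tail _ hx1⟩
      · rintro ⟨x, hx, hx1⟩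
        rcases List.mem_cons.mp hx with rfl | hx
        · -- x = a
          rcases List.mem_cons.mp hx1 with h1 | hx1
          · omega
          · rcases List.mem_cons.mp hx1 with h1 | hx1
            · exact Or.inl (by omega)
            · -- x+1 ∈ u, so b ≤ x+1 and x ≤ b: b = x or b = x+1
              have := hble _ hx1
              rcases (show b = x ∨ b = x + 1 by omega) with hb | hb
              · exact Or.inr ⟨x, by rw [← hb]; exact .head _, .tail _ hx1⟩
              · exact Or.inl (by omega)
        · -- x ∈ b::u
          rcases List.mem_cons.mp hx1 with h1 | hx1
          · -- x + 1 = a, but a ≤ x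
            have := hab x hx; omega
          · exact Or.inr ⟨x, hx, hx1⟩

-- A-side characterisation
theorem a_iff (l : List Int) : has_consecutive_orders_py l = true ↔ ConsecPair l := by
  unfold has_consecutive_orders_py
  split
  · rename_i hlen
    simp only [Bool.false_eq_true, false_iff, ConsecPair]
    rintro ⟨x, hx, hx1⟩
    match l, hlen with
    | [], _ => simp at hx
    | [a], _ => simp at hx hx1; omega
  · rename_i hlen
    set s := PySem.List.sorted l (fun x => x) false with hs
    have hperm : s.Perm l := PySem.List.sorted_perm l (fun x => x) false
    have hpw : s.Pairwise (fun a b => a ≤ b) := by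
      simpa using PySem.List.sorted_pairwise l (fun x => x)
    rw [List.any_eq_true]
    have hcp : ConsecPair l ↔ ConsecPair s := by
      unfold ConsecPair; simp only [hperm.mem_iff]
    rw [hcp]
    rw [← adjOne_iff_pair s hpw, adjOne_iff_getD]
    constructor
    · rintro ⟨i, hi, hd⟩
      rw [PySem.List.mem_pyRange_one] at hi
      obtain ⟨hi0, hilt⟩ := hi
      obtain ⟨k, rfl⟩ : ∃ k : ℕ, i = (k : Int) := ⟨i.toNat, by omega⟩
      have hk1 : (k : Int) + 1 < s.length := by omega
      have hklt : k + 1 < s.length := by exact_mod_cast hk1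
      refine ⟨k, hklt, ?_⟩
      rw [PySem.List.pyGetD_eq_getElem s 0 (by omega) (by omega),
          PySem.List.pyGetD_eq_getElem s 0 (by omega) (by omega)] at hd
      rw [beq_iff_eq] at hd
      simpa [List.getD_eq_getElem?_getD, List.getElem?_eq_getElem (by omega : k + 1 < s.length),
        List.getElem?_eq_getElem (by omega : k < s.length),
        show ((k : Int) + 1).toNat = k + 1 by omega, show ((k : Int)).toNat = k by omega] using hd
    · rintro ⟨k, hk, hd⟩
      refine ⟨(k : Int), ?_, ?_⟩
      · rw [PySem.List.mem_pyRange_one]; constructor <;> omega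
      · rw [PySem.List.pyGetD_eq_getElem s 0 (by omega) (by omega),
            PySem.List.pyGetD_eq_getElem s 0 (by omega) (by omega), beq_iff_eq]
        simpa [List.getD_eq_getElem?_getD, List.getElem?_eq_getElem (by omega : k + 1 < s.length),
          List.getElem?_eq_getElem (by omega : k < s.length),
          show ((k : Int) + 1).toNat = k + 1 by omega, show ((k : Int)).toNat = k by omega] using hd

-- ===== VERDICT (by name: the statement is the Claim_ definition above) =====
theorem has_consecutive_orders_py_spec : Claim_equal_has_consecutive_orders_py := by
  intro orders _
  unfold Spec_has_consecutive_orders_py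
  have h1 := a_iff orders
  have h2 := alt_iff orders
  by_cases h : ConsecPair orders
  · rw [h1.mpr h, h2.mpr h]
  · rw [Bool.eq_false_iff.mpr (fun hc => h (h1.mp hc)),
        Bool.eq_false_iff.mpr (fun hc => h (h2.mp hc))]
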